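-- pv_equiv track=rewrite | github.com/WaterbendingToph/Essence-Magician-Creator | src/BackendResources/LootingStuff/SpecificItemGeneratorTest.py | stripAndFormat
-- ===== SOURCE A (Python) =====
-- def stripAndFormat(inputString):
--     tempArray = inputString[0].split(',')
--     results = tempArray[0]
--     for thingLooted in tempArray[1:]:
--         if thingLooted.count('"description":') == 0:
--             results += '\n' + thingLooted
--         else:
--             results += '}'
--             break
--     return results
-- ===== SOURCE B (Python) =====
-- def stripAndFormat(inputString):
--     parts = inputString[0].split(',')
--     idx = next((i for i in range(1, len(parts)) if '"description":' in parts[i]), None)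
--     if idx is None:
--         return '\n'.join(parts)
--     return '\n'.join(parts[:idx]) + '}'
-- ===== Notes on version B (the rewrite author's own statement) =====
-- stated objective: simpler
-- what changed: Replaces the accumulate-with-early-break loop by locate-then-join: find the first field after the head containing the description marker, then join the kept prefix (appending '}' only on a hit).
import Mathlib
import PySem

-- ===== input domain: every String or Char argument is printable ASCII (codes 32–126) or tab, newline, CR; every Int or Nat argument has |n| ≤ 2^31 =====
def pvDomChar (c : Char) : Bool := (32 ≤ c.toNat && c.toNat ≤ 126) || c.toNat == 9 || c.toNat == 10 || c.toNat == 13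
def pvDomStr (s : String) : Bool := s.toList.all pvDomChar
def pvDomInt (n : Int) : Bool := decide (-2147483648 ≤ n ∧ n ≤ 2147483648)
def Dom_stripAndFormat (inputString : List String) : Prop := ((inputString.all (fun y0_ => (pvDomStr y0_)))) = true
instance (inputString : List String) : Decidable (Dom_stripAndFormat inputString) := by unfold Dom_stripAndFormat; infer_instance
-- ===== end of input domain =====

-- B replaces A's accumulate-with-early-break loop by a locate-then-join decomposition (same cost, plainer structure).

-- ===== PORT A =====
-- the for-loop with break: accumulate '\n'+field until a field contains the marker, then append '}' and stop
def stripLoop (results : String) : List String → String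
  | [] => results
  | t :: rest =>
      if PySem.Str.count t "\"description\":" == 0 then
        stripLoop (results ++ "\n" ++ t) rest
      else
        results ++ "}"

def stripAndFormat (inputString : List String) : String :=
  match inputString with
  | [] => ""   -- Python raises IndexError here; excluded by Pre_stripAndFormat
  | s :: _ =>
    let tempArray := (PySem.Str.split? s ",").getD []   -- split? is none only for sep = ""
    stripLoop (tempArray.headD "") (tempArray.drop 1)

-- ===== PORT B =====
def stripAndFormat_alt (inputString : List String) : String :=
  match inputString with
  | [] => ""   -- Python raises IndexError here; excluded by Pre_stripAndFormat
  | s :: _ =>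
    let parts := (PySem.Str.split? s ",").getD []   -- split? is none only for sep = ""
    -- idx = next((i for i in range(1, len(parts)) if marker in parts[i]), None); here j = idx - 1
    match (parts.drop 1).findIdx? (fun t => PySem.Str.isIn "\"description\":" t) with
    | none => PySem.Str.join "\n" parts
    | some j => PySem.Str.join "\n" (parts.take (j + 1)) ++ "}"

-- ===== PRECONDITION & SPEC =====
-- Pre_ excludes only the empty list, on which A raises IndexError (inputString[0]).
def Pre_stripAndFormat (inputString : List String) : Prop := inputString ≠ []
instance (inputString : List String) : Decidable (Pre_stripAndFormat inputString) := by unfold Pre_stripAndFormat; infer_instance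
def pvWitness_stripAndFormat : List String := ["a,b,\"description\": 1,c"]

def Spec_stripAndFormat (inputString : List String) (out : String) : Prop := out = stripAndFormat_alt inputString
instance (inputString : List String) (out : String) : Decidable (Spec_stripAndFormat inputString out) := by unfold Spec_stripAndFormat; infer_instance

-- ===== CLAIM (what is proved, stated in full; the proofs are below) =====
def Claim_equal_stripAndFormat : Prop := ∀ (inputString : List String), Dom_stripAndFormat inputString → Pre_stripAndFormat inputString → Spec_stripAndFormat inputString (stripAndFormat inputString)

-- ===== LEMMAS AND PROOFS =====

-- count.go never drops below the accumulator
lemma stripCountGo_le (sub : List Char) : ∀ (fuel : Nat) (l : List Char) (acc : Nat),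
    acc ≤ PySem.Chars.count.go sub fuel l acc := by
  intro fuel
  induction fuel with
  | zero => intro l acc; cases l <;> simp [PySem.Chars.count.go]
  | succ n ih =>
      intro l acc
      cases l with
      | nil => simp [PySem.Chars.count.go]
      | cons h t =>
          simp only [PySem.Chars.count.go]
          split
          · exact le_trans (Nat.le_succ acc) (ih _ _)
          · exact ih _ _

-- count.go returns its accumulator exactly when the pattern does not occur
lemma stripCountGo_eq_acc_iff (sub : List Char) (hsub : sub ≠ []) :
    ∀ (fuel : Nat) (l : List Char) (acc : Nat), l.length ≤ fuel →
      (PySem.Chars.count.go sub fuel l acc = acc ↔ ¬ sub <:+: l) := by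
  intro fuel
  induction fuel with
  | zero =>
      intro l acc hl
      have : l = [] := List.eq_nil_of_length_eq_zero (Nat.le_zero.mp hl)
      subst this
      simp [PySem.Chars.count.go, List.infix_nil, hsub]
  | succ n ih =>
      intro l acc hl
      cases l with
      | nil => simp [PySem.Chars.count.go, List.infix_nil, hsub]
      | cons h t =>
          simp only [PySem.Chars.count.go]
          split
          · rename_i hpref
            constructor
            · intro heq
              have := stripCountGo_le sub n (List.drop sub.length (h :: t)) (acc + 1)
              omega
            · intro habs
              exact absurd ((List.isPrefixOf_iff_prefix.mp hpref)).isInfix habs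
          · rename_i hpref
            rw [ih t acc (by simpa using Nat.le_of_succ_le_succ (by simpa using hl))]
            rw [List.infix_cons_iff]
            constructor
            · intro hni hcon
              rcases hcon with hp | hi
              · exact hpref (List.isPrefixOf_iff_prefix.mpr hp)
              · exact hni hi
            · intro hni hi
              exact hni (Or.inr hi)

-- A's guard 'count == 0' is B's '¬ (marker in t)', at the character level
lemma stripCountChars_eq (cs : List Char) :
    (PySem.Chars.count cs ("\"description\":".toList) == 0)
      = !(PySem.Chars.isIn ("\"description\":".toList) cs) := by
  have hiff := stripCountGo_eq_acc_iff ("\"description\":".toList) (by decide)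
      cs.length cs 0 (le_refl _)
  unfold PySem.Chars.count
  rw [if_neg (by decide)]
  by_cases hinf : ("\"description\":".toList) <:+: cs
  · have hgo : PySem.Chars.count.go ("\"description\":".toList) cs.length cs 0 ≠ 0 := by
      intro h0; exact (hiff.mp h0) hinf
    have hin : PySem.Chars.isIn ("\"description\":".toList) cs = true :=
      (PySem.Chars.isIn_iff_infix ..).mpr hinf
    rw [hin, Bool.not_true]
    exact beq_eq_false_iff_ne.mpr hgo
  · have hgo : PySem.Chars.count.go ("\"description\":".toList) cs.length cs 0 = 0 := hiff.mpr hinf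
    have hin : PySem.Chars.isIn ("\"description\":".toList) cs = false :=
      (PySem.Chars.isIn_eq_false_iff ..).mpr hinf
    rw [hin, hgo, Bool.not_false]
    rfl

-- and at the string level
lemma stripCount_eq (t : String) :
    (PySem.Str.count t "\"description\":" == 0) = !(PySem.Str.isIn "\"description\":" t) := by
  rw [PySem.Str.count_eq, PySem.Str.isIn_eq]
  exact stripCountChars_eq t.toList

-- prepending an already-joined field commutes with join
lemma stripJoin_shift (res t : String) (l : List String) :
    PySem.Str.join "\n" ((res ++ "\n" ++ t) :: l) = PySem.Str.join "\n" (res :: t :: l) := by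
  apply String.toList_inj.mp
  cases l with
  | nil => simp [PySem.Str.join, PySem.Chars.join_singleton, PySem.Chars.join_cons_cons]
  | cons y ys => simp [PySem.Str.join, PySem.Chars.join_cons_cons]

-- the loop equals B's locate-then-join over the tail
lemma stripLoop_eq_join : ∀ (ts : List String) (res : String),
    stripLoop res ts =
      match ts.findIdx? (fun t => PySem.Str.isIn "\"description\":" t) with
      | none => PySem.Str.join "\n" (res :: ts)
      | some j => PySem.Str.join "\n" (res :: ts.take j) ++ "}" := by
  intro ts
  induction ts with
  | nil =>
      intro res
      apply String.toList_inj.mp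
      simp [stripLoop, PySem.Str.join, PySem.Chars.join_singleton]
  | cons t rest ih =>
      intro res
      simp only [stripLoop, stripCount_eq, List.findIdx?_cons]
      by_cases hb : PySem.Str.isIn "\"description\":" t = true
      · rw [hb]
        simp only [Bool.not_true, Bool.false_eq_true, if_false]
        apply String.toList_inj.mp
        simp [PySem.Str.join, PySem.Chars.join_singleton]
      · rw [Bool.eq_false_iff.mpr hb]
        simp only [Bool.not_false, Bool.false_eq_true, if_false, ih]
        cases hidx : rest.findIdx? (fun t => PySem.Str.isIn "\"description\":" t) with
        | none => simp [stripJoin_shift]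
        | some j => simp [stripJoin_shift, List.take_succ_cons]

-- ===== VERDICT (by name: the statement is the Claim_ definition above) =====
theorem stripAndFormat_spec : Claim_equal_stripAndFormat := by
  intro inputString _ hpre
  unfold Spec_stripAndFormat
  match inputString with
  | [] => exact absurd rfl hpre
  | s :: rest =>
      simp only [stripAndFormat, stripAndFormat_alt]
      cases hsp : (PySem.Str.split? s ",").getD [] with
      | nil =>
          apply String.toList_inj.mp
          simp [stripLoop, PySem.Str.join, PySem.Chars.join_nil]
      | cons h t =>
          simp only [List.headD, List.drop_succ_cons, List.drop_zero, stripLoop_eq_join]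
          cases hidx : t.findIdx? (fun t => PySem.Str.isIn "\"description\":" t) with
          | none => simp
          | some j => simp [List.take_succ_cons]
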